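-- pv_equiv track=rewrite | github.com/callahad/pyScss | scss/scss.py | longest_common_prefix
-- ===== SOURCE A (Python) =====
-- def longest_common_prefix(seq1, seq2):
--     start = 0
--     common = 0
--     length = min(len(seq1), len(seq2))
--     while start < length:
--         if seq1[start] != seq2[start]:
--             break
--         if seq1[start] == ' ':
--             common = start + 1
--         elif seq1[start] in ('#', ':', '.'):
--             common = start
--         start += 1
--     return common
-- ===== SOURCE B (Python) =====
-- def longest_common_prefix(seq1, seq2):
--     # Pass 1: length of the matching prefix.
--     n = min(len(seq1), len(seq2))
--     m = 0
--     while m < n and seq1[m] == seq2[m]: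
--         m += 1
--     # Pass 2: scan the matched prefix backwards for the last separator.
--     for i in range(m - 1, -1, -1):
--         c = seq1[i]
--         if c == ' ':
--             return i + 1
--         if c in ('#', ':', '.'):
--             return i
--     return 0
-- ===== Notes on version B (the rewrite author's own statement) =====
-- stated objective: alternative
-- what changed: Replaces the single forward pass that tracks the last separator seen with two passes: first compute the divergence point, then scan the matched prefix backwards and return at the first separator found.
import Mathlib
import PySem

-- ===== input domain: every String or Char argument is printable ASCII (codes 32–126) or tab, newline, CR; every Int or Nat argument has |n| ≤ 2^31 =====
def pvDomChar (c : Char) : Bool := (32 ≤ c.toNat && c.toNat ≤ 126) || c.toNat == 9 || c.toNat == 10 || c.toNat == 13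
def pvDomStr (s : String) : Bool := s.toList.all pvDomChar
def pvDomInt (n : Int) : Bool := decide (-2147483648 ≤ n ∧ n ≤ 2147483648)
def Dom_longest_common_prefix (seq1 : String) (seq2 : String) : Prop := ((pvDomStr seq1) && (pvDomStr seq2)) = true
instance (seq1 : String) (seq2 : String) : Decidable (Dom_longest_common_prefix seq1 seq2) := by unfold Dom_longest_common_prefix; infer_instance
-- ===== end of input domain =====

-- B replaces A's single forward pass tracking the last separator with a divergence pass
-- plus a backward first-separator pass (objective: alternative decomposition, same cost).

-- ===== PORT A =====
-- A's while loop: state (start, common); break on mismatch. Indices are in range, so getD is exact.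
def lcpALoop (c1 c2 : List Char) (n : Nat) (start : Nat) (common : Int) : Int :=
  if start < n then
    if c1.getD start ' ' ≠ c2.getD start ' ' then common
    else
      let common' : Int :=
        if c1.getD start ' ' = ' ' then (start : Int) + 1
        else if c1.getD start ' ' = '#' ∨ c1.getD start ' ' = ':' ∨ c1.getD start ' ' = '.' then (start : Int)
        else common
      lcpALoop c1 c2 n (start + 1) common'
  else common
termination_by n - start
decreasing_by omega

def longest_common_prefix (seq1 : String) (seq2 : String) : Int :=
  let c1 := seq1.toList
  let c2 := seq2.toList
  lcpALoop c1 c2 (min c1.length c2.length) 0 0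

-- ===== PORT B =====
-- B's pass 1: while m < n and seq1[m] == seq2[m]: m += 1
def lcpMatch (c1 c2 : List Char) (n : Nat) (m : Nat) : Nat :=
  if m < n ∧ c1.getD m ' ' = c2.getD m ' ' then lcpMatch c1 c2 n (m + 1) else m
termination_by n - m
decreasing_by omega

-- B's pass 2: for i in range(m-1, -1, -1): …  (argument is the number of indices left to scan)
def lcpBack (c1 : List Char) : Nat → Int
  | 0 => 0
  | i + 1 =>
    let c := c1.getD i ' '
    if c = ' ' then (i : Int) + 1
    else if c = '#' ∨ c = ':' ∨ c = '.' then (i : Int)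
    else lcpBack c1 i

def longest_common_prefix_alt (seq1 : String) (seq2 : String) : Int :=
  let c1 := seq1.toList
  let c2 := seq2.toList
  lcpBack c1 (lcpMatch c1 c2 (min c1.length c2.length) 0)

-- ===== PRECONDITION & SPEC =====
def Spec_longest_common_prefix (seq1 : String) (seq2 : String) (out : Int) : Prop := out = longest_common_prefix_alt seq1 seq2
instance (seq1 : String) (seq2 : String) (out : Int) : Decidable (Spec_longest_common_prefix seq1 seq2 out) := by unfold Spec_longest_common_prefix; infer_instance

-- ===== CLAIM (what is proved, stated in full; the proofs are below) =====
def Claim_equal_longest_common_prefix : Prop := ∀ (seq1 : String) (seq2 : String), Dom_longest_common_prefix seq1 seq2 → Spec_longest_common_prefix seq1 seq2 (longest_common_prefix seq1 seq2)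

-- ===== LEMMAS AND PROOFS =====

-- proof-side generalization of lcpBack: scan i-1, i-2, …, lo; default `common`
def back (c1 : List Char) (lo : Nat) (common : Int) : Nat → Int
  | 0 => common
  | i + 1 =>
    if i + 1 ≤ lo then common
    else
      let c := c1.getD i ' '
      if c = ' ' then (i : Int) + 1
      else if c = '#' ∨ c = ':' ∨ c = '.' then (i : Int)
      else back c1 lo common i

theorem back_zero (c1 : List Char) (i : Nat) : back c1 0 0 i = lcpBack c1 i := by
  induction i with
  | zero => rfl
  | succ i ih => simp [back, lcpBack, ih]

theorem back_le (c1 : List Char) (lo : Nat) (common : Int) (i : Nat) (h : i ≤ lo) :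
    back c1 lo common i = common := by
  cases i with
  | zero => rfl
  | succ i => simp [back, h]

-- pushing the bottom index down by one: scanning down to `start` with default `common`
-- equals scanning down to `start+1` with the start-cell's value as default
theorem back_step (c1 : List Char) (start : Nat) (common : Int) (i : Nat) (h : start < i) :
    back c1 start common i =
      back c1 (start + 1)
        (if c1.getD start ' ' = ' ' then (start : Int) + 1
         else if c1.getD start ' ' = '#' ∨ c1.getD start ' ' = ':' ∨ c1.getD start ' ' = '.' then (start : Int)
         else common) i := by
  induction i with
  | zero => omega
  | succ i ih =>
    rcases Nat.lt_or_ge start i with hi | hi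
    · have h1 : ¬ (i + 1 ≤ start) := by omega
      have h2 : ¬ (i + 1 ≤ start + 1) := by omega
      rw [back, back, if_neg h1, if_neg h2]
      rw [ih hi]
    · have hs : i = start := by omega
      subst hs
      have h1 : ¬ (i + 1 ≤ i) := by omega
      rw [back, if_neg h1, back_le c1 (i + 1) _ (i + 1) (le_refl _),
          back_le c1 i common i (le_refl _)]

theorem lcpMatch_ge (c1 c2 : List Char) (n m : Nat) : m ≤ lcpMatch c1 c2 n m := by
  unfold lcpMatch
  split
  · have := lcpMatch_ge c1 c2 n (m + 1)
    omega
  · exact le_refl _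
termination_by n - m
decreasing_by omega

theorem aLoop_eq_back (c1 c2 : List Char) (n : Nat) (start : Nat) (common : Int) :
    lcpALoop c1 c2 n start common = back c1 start common (lcpMatch c1 c2 n start) := by
  by_cases h : start < n ∧ c1.getD start ' ' = c2.getD start ' '
  · obtain ⟨h1, h2⟩ := h
    rw [lcpALoop, if_pos h1, if_neg (not_not_intro h2)]
    have hm : lcpMatch c1 c2 n start = lcpMatch c1 c2 n (start + 1) := by
      rw [lcpMatch, if_pos ⟨h1, h2⟩]
    rw [hm, aLoop_eq_back c1 c2 n (start + 1),
        ← back_step c1 start common _ (by have := lcpMatch_ge c1 c2 n (start + 1); omega)]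
  · have hm : lcpMatch c1 c2 n start = start := by
      rw [lcpMatch, if_neg h]
    rw [hm, back_le c1 start common start (le_refl _), lcpALoop]
    by_cases h1 : start < n
    · have h2 : c1.getD start ' ' ≠ c2.getD start ' ' := fun hc => h ⟨h1, hc⟩
      rw [if_pos h1, if_pos h2]
    · rw [if_neg h1]
termination_by n - start
decreasing_by omega

-- ===== VERDICT (by name: the statement is the Claim_ definition above) =====
theorem longest_common_prefix_spec : Claim_equal_longest_common_prefix := by
  intro seq1 seq2 _
  unfold Spec_longest_common_prefix longest_common_prefix longest_common_prefix_alt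
  rw [aLoop_eq_back, back_zero]
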